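-- pv_equiv track=rewrite | github.com/ycarmiel/topic-radar | core/aggregator.py | prioritize_sections
-- ===== SOURCE A (Python) =====
-- INTENT_PRIORITY: dict[str, list[str]] = {
--     "academic":    ["papers", "news", "discussions", "videos", "code"],
--     "tutorial":    ["news", "code", "discussions", "videos", "papers"],
--     "business":    ["news", "discussions", "papers", "videos", "code"],
--     "exploratory": ["news", "papers", "discussions", "videos", "code"],
-- }
--
-- _DEFAULT_PRIORITY: list[str] = INTENT_PRIORITY["exploratory"]
--
-- def prioritize_sections(
--     grouped: dict[str, list[object]],
--     intent: str,
-- ) -> list[tuple[str, list[object]]]: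
--     """Order content sections by intent-based priority.
--
--     Sections with zero results are omitted. Sections not listed in the intent
--     priority map are appended at the end in arbitrary order.
--
--     Args:
--         grouped: Dict mapping content_type → results (from ``group_by_type``).
--         intent: Detected user intent string (``"academic"``, ``"tutorial"``, …).
--
--     Returns:
--         List of ``(content_type, results)`` tuples, highest priority first.
--
--     Examples:
--         >>> prioritize_sections({"papers": [...], "news": [...]}, "academic")
--         [("papers", [...]), ("news", [...])]
--     """
--     priority_order = INTENT_PRIORITY.get(intent, _DEFAULT_PRIORITY)
--
--     ordered: list[tuple[str, list[object]]] = []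
--     appended_types: set[str] = set()
--
--     # First: add sections in priority order (skip empty ones)
--     for content_type in priority_order:
--         if content_type in grouped and grouped[content_type]:
--             ordered.append((content_type, grouped[content_type]))
--             appended_types.add(content_type)
--
--     # Then: append any remaining types not in the priority list
--     for content_type, results in grouped.items():
--         if content_type not in appended_types and results:
--             ordered.append((content_type, results))
--
--     return ordered
-- ===== SOURCE B (Python) =====
-- INTENT_PRIORITY: dict[str, list[str]] = {
--     "academic":    ["papers", "news", "discussions", "videos", "code"],
--     "tutorial":    ["news", "code", "discussions", "videos", "papers"],
--     "business":    ["news", "discussions", "papers", "videos", "code"],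
--     "exploratory": ["news", "papers", "discussions", "videos", "code"],
-- }
--
-- _DEFAULT_PRIORITY: list[str] = INTENT_PRIORITY["exploratory"]
--
-- def prioritize_sections(grouped, intent):
--     priority_order = INTENT_PRIORITY.get(intent, _DEFAULT_PRIORITY)
--     rank = {t: i for i, t in enumerate(priority_order)}
--     sentinel = len(priority_order)
--     items = [(t, rs) for t, rs in grouped.items() if rs]
--     return sorted(items, key=lambda kv: rank.get(kv[0], sentinel))
-- ===== Notes on version B (the rewrite author's own statement) =====
-- stated objective: simpler
-- what changed: Replaces A's two-pass build (scan the priority list appending hits while tracking an appended set, then scan grouped for leftovers) with a single stable sort of the non-empty sections keyed by a rank dict built from the priority list, all unlisted sections sharing the sentinel rank len(priority_order).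
import Mathlib
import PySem

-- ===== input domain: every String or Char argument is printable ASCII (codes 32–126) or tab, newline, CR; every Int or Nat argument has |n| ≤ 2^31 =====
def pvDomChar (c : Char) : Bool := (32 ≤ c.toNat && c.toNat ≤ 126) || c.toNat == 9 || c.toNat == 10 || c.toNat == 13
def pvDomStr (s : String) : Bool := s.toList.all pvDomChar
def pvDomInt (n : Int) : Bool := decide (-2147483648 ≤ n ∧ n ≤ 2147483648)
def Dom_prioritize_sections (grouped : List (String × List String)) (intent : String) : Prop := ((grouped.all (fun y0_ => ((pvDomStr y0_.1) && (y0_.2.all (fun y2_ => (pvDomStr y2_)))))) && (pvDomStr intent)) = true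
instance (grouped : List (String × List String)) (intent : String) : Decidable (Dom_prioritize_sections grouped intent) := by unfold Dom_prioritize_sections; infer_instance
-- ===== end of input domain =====

-- B replaces A's two append loops with one stable sort of the non-empty sections, keyed by a
-- rank dict built from the priority list (unlisted sections share the sentinel rank); objective: simpler.

-- ===== PORT A =====
-- module constants shared by both versions
def pvINTENT_PRIORITY : PySem.Dict String (List String) :=
  PySem.Dict.ofList
    [ ("academic",    ["papers", "news", "discussions", "videos", "code"]),
      ("tutorial",    ["news", "code", "discussions", "videos", "papers"]),
      ("business",    ["news", "discussions", "papers", "videos", "code"]),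
      ("exploratory", ["news", "papers", "discussions", "videos", "code"]) ]

-- INTENT_PRIORITY["exploratory"]: the key is present in the literal, so the KeyError branch is dead
def pvDEFAULT_PRIORITY : List String := PySem.Dict.getD pvINTENT_PRIORITY "exploratory" []

def prioritize_sections (grouped : List (String × List String)) (intent : String) : List (String × List String) :=
  let priority_order := PySem.Dict.getD pvINTENT_PRIORITY intent pvDEFAULT_PRIORITY
  -- first loop: ordered / appended_types accumulated together
  let st := priority_order.foldl
    (fun (st : List (String × List String) × PySem.Set String) content_type =>
      match (PySem.Dict.mk grouped).get? content_type with
      | some rs => if rs.isEmpty then st else (st.1 ++ [(content_type, rs)], PySem.Set.add st.2 content_type)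
      | none => st)
    ([], PySem.Set.empty)
  -- second loop over grouped.items()
  grouped.foldl
    (fun ordered kv =>
      if !(PySem.Set.contains st.2 kv.1) && !kv.2.isEmpty then ordered ++ [kv] else ordered)
    st.1

-- ===== PORT B =====
def prioritize_sections_alt (grouped : List (String × List String)) (intent : String) : List (String × List String) :=
  let priority_order := PySem.Dict.getD pvINTENT_PRIORITY intent pvDEFAULT_PRIORITY
  let rank := (PySem.List.enumerate priority_order).foldl
    (fun (d : PySem.Dict String Int) p => d.insert p.2 p.1) PySem.Dict.empty
  let sentinel : Int := (priority_order.length : Int)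
  let items := grouped.filter (fun kv => !kv.2.isEmpty)
  PySem.List.sorted items (fun kv => rank.getD kv.1 sentinel)

-- ===== PRECONDITION & SPEC =====
-- Pre_ excludes association lists with duplicate keys: they do not represent a Python dict
-- (A's parameter 'grouped' is a dict, whose keys are necessarily distinct).
def Pre_prioritize_sections (grouped : List (String × List String)) (intent : String) : Prop :=
  (grouped.map Prod.fst).Nodup

instance (grouped : List (String × List String)) (intent : String) : Decidable (Pre_prioritize_sections grouped intent) := by
  unfold Pre_prioritize_sections; infer_instance

def pvWitness_prioritize_sections : (List (String × List String)) × String :=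
  ([("papers", ["p1"]), ("blogs", ["b1"]), ("news", [])], "academic")

def Spec_prioritize_sections (grouped : List (String × List String)) (intent : String) (out : List (String × List String)) : Prop := out = prioritize_sections_alt grouped intent
instance (grouped : List (String × List String)) (intent : String) (out : List (String × List String)) : Decidable (Spec_prioritize_sections grouped intent out) := by unfold Spec_prioritize_sections; infer_instance

-- ===== CLAIM (what is proved, stated in full; the proofs are below) =====
def Claim_equal_prioritize_sections : Prop := ∀ (grouped : List (String × List String)) (intent : String), Dom_prioritize_sections grouped intent → Pre_prioritize_sections grouped intent → Spec_prioritize_sections grouped intent (prioritize_sections grouped intent)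

-- ===== LEMMAS AND PROOFS =====

-- "content_type in grouped and grouped[content_type]" as a Bool
def pvHit (grouped : List (String × List String)) (t : String) : Bool :=
  match (PySem.Dict.mk grouped).get? t with
  | some rs => !rs.isEmpty
  | none => false

-- first loop, ordered component
theorem pv_loop1_fst (grouped : List (String × List String)) (P : List String)
    (acc : List (String × List String)) (s : PySem.Set String) :
    (P.foldl
      (fun (st : List (String × List String) × PySem.Set String) ct =>
        match (PySem.Dict.mk grouped).get? ct with
        | some rs => if rs.isEmpty then st else (st.1 ++ [(ct, rs)], PySem.Set.add st.2 ct)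
        | none => st) (acc, s)).1
    = acc ++ P.flatMap (fun t =>
        match (PySem.Dict.mk grouped).get? t with
        | some rs => if rs.isEmpty then [] else [(t, rs)]
        | none => []) := by
  induction P generalizing acc s with
  | nil => simp
  | cons t P ih =>
    cases hg : (PySem.Dict.mk grouped).get? t with
    | none =>
      simp only [List.foldl_cons, List.flatMap_cons, hg]
      simpa using ih acc s
    | some rs =>
      by_cases he : rs.isEmpty
      · simp only [List.foldl_cons, List.flatMap_cons, hg, if_pos he]
        simpa using ih acc s
      · simp only [List.foldl_cons, List.flatMap_cons, hg, if_neg he]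
        rw [ih]
        simp

-- first loop, appended_types component (membership view)
theorem pv_loop1_snd (grouped : List (String × List String)) (P : List String)
    (acc : List (String × List String)) (s : PySem.Set String) (x : String) :
    (x ∈ (P.foldl
      (fun (st : List (String × List String) × PySem.Set String) ct =>
        match (PySem.Dict.mk grouped).get? ct with
        | some rs => if rs.isEmpty then st else (st.1 ++ [(ct, rs)], PySem.Set.add st.2 ct)
        | none => st) (acc, s)).2)
    ↔ (x ∈ s ∨ (x ∈ P ∧ pvHit grouped x = true)) := by
  induction P generalizing acc s with
  | nil => simp
  | cons t P ih =>
    cases hg : (PySem.Dict.mk grouped).get? t with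
    | none =>
      simp only [List.foldl_cons, List.mem_cons, hg]
      rw [ih]
      have hxt : pvHit grouped t = false := by simp [pvHit, hg]
      constructor
      · rintro (h | ⟨h1, h2⟩)
        · exact Or.inl h
        · exact Or.inr ⟨Or.inr h1, h2⟩
      · rintro (h | ⟨h1, h2⟩)
        · exact Or.inl h
        · rcases h1 with rfl | h1
          · rw [h2] at hxt; cases hxt
          · exact Or.inr ⟨h1, h2⟩
    | some rs =>
      by_cases he : rs.isEmpty
      · simp only [List.foldl_cons, List.mem_cons, hg, if_pos he]
        rw [ih]
        have hxt : pvHit grouped t = false := by simp [pvHit, hg, he]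
        constructor
        · rintro (h | ⟨h1, h2⟩)
          · exact Or.inl h
          · exact Or.inr ⟨Or.inr h1, h2⟩
        · rintro (h | ⟨h1, h2⟩)
          · exact Or.inl h
          · rcases h1 with rfl | h1
            · rw [h2] at hxt; cases hxt
            · exact Or.inr ⟨h1, h2⟩
      · simp only [List.foldl_cons, List.mem_cons, hg, if_neg he]
        rw [ih]
        have hxt : pvHit grouped t = true := by simp [pvHit, hg, he]
        constructor
        · rintro (h | ⟨h1, h2⟩)
          · rcases (PySem.Set.mem_add s t x).mp h with h' | rfl
            · exact Or.inl h'
            · exact Or.inr ⟨Or.inl rfl, hxt⟩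
          · exact Or.inr ⟨Or.inr h1, h2⟩
        · rintro (h | ⟨h1, h2⟩)
          · exact Or.inl ((PySem.Set.mem_add s t x).mpr (Or.inl h))
          · rcases h1 with rfl | h1
            · exact Or.inl ((PySem.Set.mem_add s x x).mpr (Or.inr rfl))
            · exact Or.inr ⟨h1, h2⟩

-- with distinct keys, the first-match lookup describes the single matching filter cell
theorem pv_filter_key (grouped : List (String × List String))
    (hg : (grouped.map Prod.fst).Nodup) (t : String) :
    grouped.filter (fun kv => kv.1 == t && !kv.2.isEmpty)
      = (match (PySem.Dict.mk grouped).get? t with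
         | some rs => if rs.isEmpty then [] else [(t, rs)]
         | none => []) := by
  induction grouped with
  | nil => simp [PySem.Dict.get?]
  | cons kv l ih =>
    obtain ⟨k, v⟩ := kv
    simp only [List.map_cons, List.nodup_cons] at hg
    by_cases hk : k = t
    · subst hk
      have htail : l.filter (fun kv => kv.1 == k && !kv.2.isEmpty) = [] := by
        rw [List.filter_eq_nil_iff]
        intro kv hkv
        have : kv.1 ≠ k := fun h => hg.1 (h ▸ List.mem_map_of_mem hkv)
        simp [this]
      rw [PySem.Dict.get?_mk_cons]
      by_cases he : v.isEmpty <;> simp [he, htail]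
    · rw [PySem.Dict.get?_mk_cons, if_neg (show ¬ ((k == t) = true) by simp [hk])]
      rw [List.filter_cons, if_neg (by simp [hk])]
      exact ih hg.2

-- the rank dict built from enumerate(priority_order) is lookup-equal to idxOf / sentinel
theorem pv_rank_getD (P : List String) (hP : P.Nodup) (t : String) (d : Int) :
    ((PySem.List.enumerate P).foldl (fun (d : PySem.Dict String Int) p => d.insert p.2 p.1) PySem.Dict.empty).getD t d
      = if t ∈ P then (P.idxOf t : Int) else d := by
  have hitems : ((PySem.List.enumerate P).foldl (fun (d : PySem.Dict String Int) p => d.insert p.2 p.1) PySem.Dict.empty).items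
      = (PySem.List.enumerate P).map (fun p => (p.2, p.1)) := by
    have := PySem.Dict.items_foldl_insert_fresh (l := PySem.List.enumerate P)
      (k := fun p => p.2) (v := fun p => p.1) (d := PySem.Dict.empty)
      (by intro a _; simp [PySem.Dict.contains_empty])
      (by rw [PySem.List.map_snd_enumerate]; exact hP)
    simpa [PySem.Dict.items] using this
  have hkeys : ((PySem.List.enumerate P).foldl (fun (d : PySem.Dict String Int) p => d.insert p.2 p.1) PySem.Dict.empty).keys = P := by
    simp only [PySem.Dict.keys, hitems, List.map_map]
    have : ((fun (x : String × Int) => x.1) ∘ fun (p : Int × String) => (p.2, p.1)) = fun p => p.2 := rfl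
    rw [this, PySem.List.map_snd_enumerate]
  by_cases ht : t ∈ P
  · rw [if_pos ht]
    apply PySem.Dict.getD_of_mem_items
    · rw [hitems]
      have hlt : P.idxOf t < P.length := List.idxOf_lt_length_of_mem ht
      refine List.mem_map.mpr ⟨((P.idxOf t : Int), t), ?_, rfl⟩
      rw [PySem.List.mem_enumerate_iff]
      exact ⟨P.idxOf t, hlt, by simp [List.getElem_idxOf]⟩
    · rw [hkeys]; exact hP
  · rw [if_neg ht]
    apply PySem.Dict.getD_of_not_contains
    rw [PySem.Dict.contains_eq_decide_mem_keys, hkeys]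
    simp [ht]

theorem pv_insertBy_all_before {α : Type} (bf : α → α → Bool) (x : α) (l : List α)
    (h : ∀ y ∈ l, bf x y = true) : PySem.List.insertBy bf x l = x :: l := by
  cases l with
  | nil => simp [PySem.List.insertBy]
  | cons y ys => simp [PySem.List.insertBy, h y (by simp)]

theorem pv_insertBy_append_left {α : Type} (bf : α → α → Bool) (x : α) (l1 l2 : List α)
    (h : ∀ y ∈ l1, bf x y = false) :
    PySem.List.insertBy bf x (l1 ++ l2) = l1 ++ PySem.List.insertBy bf x l2 := by
  induction l1 with
  | nil => simp
  | cons y ys ih =>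
    simp only [List.cons_append, PySem.List.insertBy, h y (by simp)]
    simp [ih (fun z hz => h z (by simp [hz]))]

-- a stable sort by a small Int key is the concatenation of the key buckets in original order
theorem pv_sorted_eq_buckets {α : Type} (key : α → Int) (m : Nat) (xs : List α)
    (h : ∀ x ∈ xs, 0 ≤ key x ∧ key x ≤ m) :
    PySem.List.sorted xs key
      = (List.range (m+1)).flatMap (fun (r : Nat) => xs.filter (fun x => key x == (r : Int))) := by
  induction xs using List.reverseRecOn with
  | nil =>
    rw [PySem.List.sorted_eq_foldl_insertBy]
    simp
  | append_singleton xs x ih =>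
    have hx := h x (by simp)
    have hxs : ∀ y ∈ xs, 0 ≤ key y ∧ key y ≤ m := fun y hy => h y (by simp [hy])
    obtain ⟨k, hk, hkm⟩ : ∃ k : Nat, key x = (k : Int) ∧ k ≤ m := ⟨(key x).toNat, by omega, by omega⟩
    rw [PySem.List.sorted_eq_foldl_insertBy, List.foldl_append, ← PySem.List.sorted_eq_foldl_insertBy, ih hxs]
    simp only [List.foldl_cons, List.foldl_nil]
    have hsplit : List.range (m+1) = List.range (k+1) ++ (List.range (m-k)).map (fun i => (k+1)+i) := by
      rw [← List.range_add]
      congr 1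
      omega
    rw [hsplit]
    simp only [List.flatMap_append]
    rw [pv_insertBy_append_left _ _ _ _ ?_, pv_insertBy_all_before _ _ _ ?_]
    · -- main equality
      have hupper : ((List.range (m-k)).map (fun i => (k+1)+i)).flatMap
            (fun (r : Nat) => (xs ++ [x]).filter (fun y => key y == (r : Int)))
          = ((List.range (m-k)).map (fun i => (k+1)+i)).flatMap
            (fun (r : Nat) => xs.filter (fun y => key y == (r : Int))) := by
        apply List.flatMap_congr
        intro r hr
        simp only [List.mem_map, List.mem_range] at hr
        obtain ⟨i, hi, rfl⟩ := hr
        rw [List.filter_append]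
        have hne : (key x == ((k:Int) + 1 + (i:Int))) = false := by
          rw [beq_eq_false_iff_ne, hk]
          omega
        simp [hne]
      have hlow : ∀ (l : List α), (List.range (k+1)).flatMap (fun (r : Nat) => l.filter (fun y => key y == (r : Int)))
          = (List.range k).flatMap (fun (r : Nat) => l.filter (fun y => key y == (r : Int)))
            ++ l.filter (fun y => key y == (k : Int)) := by
        intro l
        rw [List.range_succ, List.flatMap_append]
        simp
      have hlowcongr : (List.range k).flatMap (fun (r : Nat) => (xs ++ [x]).filter (fun y => key y == (r : Int)))
          = (List.range k).flatMap (fun (r : Nat) => xs.filter (fun y => key y == (r : Int))) := by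
        apply List.flatMap_congr
        intro r hr
        simp only [List.mem_range] at hr
        rw [List.filter_append]
        have hne : (key x == ((r : Nat) : Int)) = false := by
          rw [beq_eq_false_iff_ne, hk]
          intro hc
          omega
        simp [hne]
      rw [hupper, hlow, hlow, hlowcongr, List.filter_append]
      have : (key x == (k : Int)) = true := by simp [hk]
      simp [this]
    · -- all upper elements are strictly greater
      intro y hy
      simp only [List.mem_flatMap, List.mem_map, List.mem_range] at hy
      obtain ⟨r, ⟨i, hi, rfl⟩, hyf⟩ := hy
      have := List.of_mem_filter hyf
      simp only [beq_iff_eq] at this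
      simp only [decide_eq_true_eq, hk, this]
      push_cast
      omega
    · -- all lower elements are not greater
      intro y hy
      simp only [List.mem_flatMap, List.mem_range] at hy
      obtain ⟨r, hr, hyf⟩ := hy
      have := List.of_mem_filter hyf
      simp only [beq_iff_eq] at this
      simp only [decide_eq_false_iff_not, hk, this, not_lt]
      omega

-- indexing a flatMap over range by positions is the flatMap over the list itself
theorem pv_flatMap_range_getElem {β : Type} (P : List String) (G : String → List β) :
    (List.range P.length).flatMap (fun r => match P[r]? with | some t => G t | none => []) = P.flatMap G := by
  induction P using List.reverseRecOn with
  | nil => simp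
  | append_singleton P x ih =>
    have hlen : (P ++ [x]).length = P.length + 1 := by simp
    rw [hlen, List.range_succ, List.flatMap_append]
    have h1 : (List.range P.length).flatMap (fun r => match (P ++ [x])[r]? with | some t => G t | none => [])
        = (List.range P.length).flatMap (fun r => match P[r]? with | some t => G t | none => []) := by
      apply List.flatMap_congr
      intro r hr
      rw [List.getElem?_append_left (List.mem_range.mp hr)]
    rw [h1, ih]
    have h2 : (P ++ [x])[P.length]? = some x := by
      rw [List.getElem?_append_right (le_refl _)]
      simp
    simp

-- every priority_order the dict lookup can produce has distinct entries
theorem pv_PO_nodup (intent : String) :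
    (PySem.Dict.getD pvINTENT_PRIORITY intent pvDEFAULT_PRIORITY).Nodup := by
  have h : pvINTENT_PRIORITY = PySem.Dict.mk
    [ ("academic",    ["papers", "news", "discussions", "videos", "code"]),
      ("tutorial",    ["news", "code", "discussions", "videos", "papers"]),
      ("business",    ["news", "discussions", "papers", "videos", "code"]),
      ("exploratory", ["news", "papers", "discussions", "videos", "code"]) ] := by decide
  rw [PySem.Dict.getD_eq_get?_getD, h]
  simp only [PySem.Dict.get?_mk_cons]
  split_ifs <;> first | decide | exact List.dedup_eq_self.mp rfl

-- the core equivalence for an arbitrary duplicate-free priority list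
theorem pv_main (grouped : List (String × List String)) (P : List String)
    (hP : P.Nodup) (hg : (grouped.map Prod.fst).Nodup) :
    (grouped.foldl
      (fun ordered kv =>
        if !(PySem.Set.contains (P.foldl
              (fun (st : List (String × List String) × PySem.Set String) ct =>
                match (PySem.Dict.mk grouped).get? ct with
                | some rs => if rs.isEmpty then st else (st.1 ++ [(ct, rs)], PySem.Set.add st.2 ct)
                | none => st) ([], PySem.Set.empty)).2 kv.1) && !kv.2.isEmpty
        then ordered ++ [kv] else ordered)
      (P.foldl
        (fun (st : List (String × List String) × PySem.Set String) ct =>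
          match (PySem.Dict.mk grouped).get? ct with
          | some rs => if rs.isEmpty then st else (st.1 ++ [(ct, rs)], PySem.Set.add st.2 ct)
          | none => st) ([], PySem.Set.empty)).1)
    = PySem.List.sorted (grouped.filter (fun kv => !kv.2.isEmpty))
        (fun kv => ((PySem.List.enumerate P).foldl
            (fun (d : PySem.Dict String Int) p => d.insert p.2 p.1) PySem.Dict.empty).getD kv.1 (P.length : Int)) := by
  have hkey : (fun (kv : String × List String) => ((PySem.List.enumerate P).foldl
            (fun (d : PySem.Dict String Int) p => d.insert p.2 p.1) PySem.Dict.empty).getD kv.1 (P.length : Int))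
      = fun kv => if kv.1 ∈ P then (P.idxOf kv.1 : Int) else (P.length : Int) :=
    funext fun kv => pv_rank_getD P hP kv.1 _
  rw [hkey]
  -- B's sort as key buckets
  rw [pv_sorted_eq_buckets _ P.length _ ?_]
  · -- split off the sentinel bucket
    rw [List.range_succ, List.flatMap_append]
    -- A's second loop is a filter appended to the first loop's result
    rw [PySem.List.foldl_append_if_eq_filter, pv_loop1_fst]
    rw [List.nil_append]
    -- the two tails agree
    have htail : grouped.filter
          (fun kv => !(PySem.Set.contains (P.foldl
              (fun (st : List (String × List String) × PySem.Set String) ct =>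
                match (PySem.Dict.mk grouped).get? ct with
                | some rs => if rs.isEmpty then st else (st.1 ++ [(ct, rs)], PySem.Set.add st.2 ct)
                | none => st) ([], PySem.Set.empty)).2 kv.1) && !kv.2.isEmpty)
        = [P.length].flatMap (fun (r : Nat) => (grouped.filter (fun kv => !kv.2.isEmpty)).filter
            (fun kv => (if kv.1 ∈ P then (P.idxOf kv.1 : Int) else (P.length : Int)) == (r : Int))) := by
      simp only [List.flatMap_cons, List.flatMap_nil, List.append_nil, List.filter_filter]
      apply List.filter_congr
      intro kv hkv
      by_cases hke : kv.2.isEmpty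
      · simp [hke]
      · have hhit : pvHit grouped kv.1 = true := by
          unfold pvHit
          rw [PySem.Dict.get?_of_mem_items (d := PySem.Dict.mk grouped) (k := kv.1) (v := kv.2) (by simpa using hkv) hg]
          simpa using hke
        have hmem : kv.1 ∈ (P.foldl
              (fun (st : List (String × List String) × PySem.Set String) ct =>
                match (PySem.Dict.mk grouped).get? ct with
                | some rs => if rs.isEmpty then st else (st.1 ++ [(ct, rs)], PySem.Set.add st.2 ct)
                | none => st) ([], PySem.Set.empty)).2 ↔ kv.1 ∈ P := by
          rw [pv_loop1_snd]
          simp [PySem.Set.empty, hhit]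
        rw [PySem.Set.contains_eq_decide]
        simp only [hmem]
        by_cases hp : kv.1 ∈ P
        · have hlt : P.idxOf kv.1 < P.length := List.idxOf_lt_length_of_mem hp
          have : ((P.idxOf kv.1 : Int) == (P.length : Int)) = false := by
            rw [beq_eq_false_iff_ne]
            intro hc
            omega
          simp [hp, hke, this]
        · simp [hp, hke]
    rw [htail]
    -- the two heads agree
    congr 1
    -- head: A's priority flatMap = B's indexed buckets
    have hhead : P.flatMap (fun t =>
          match (PySem.Dict.mk grouped).get? t with
          | some rs => if rs.isEmpty then [] else [(t, rs)]
          | none => [])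
        = P.flatMap (fun t => (grouped.filter (fun kv => !kv.2.isEmpty)).filter (fun kv => kv.1 == t)) := by
      apply List.flatMap_congr
      intro t _
      rw [List.filter_filter]
      exact (pv_filter_key grouped hg t).symm
    rw [hhead, ← pv_flatMap_range_getElem P (fun t => (grouped.filter (fun kv => !kv.2.isEmpty)).filter (fun kv => kv.1 == t))]
    apply List.flatMap_congr
    intro r hr
    have hrlt : r < P.length := List.mem_range.mp hr
    rw [List.getElem?_eq_getElem hrlt]
    apply List.filter_congr
    intro kv _
    by_cases hp : kv.1 ∈ P
    · have hiff : (P.idxOf kv.1 = r) ↔ (kv.1 = P[r]) := by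
        constructor
        · intro h
          subst h
          exact (List.getElem_idxOf (List.idxOf_lt_length_of_mem hp)).symm
        · intro h
          rw [h, List.Nodup.idxOf_getElem hP r hrlt]
      by_cases heq : kv.1 = P[r]
      · simp only [heq]
        have : List.idxOf P[r] P = r := List.Nodup.idxOf_getElem hP r hrlt
        simp [this]
      · have : (P.idxOf kv.1 : Int) ≠ (r : Int) := by
          intro hc
          exact heq (hiff.mp (by exact_mod_cast hc))
        simp [hp, heq, this]
    · have hPr : P[r] ∈ P := List.getElem_mem hrlt
      have hne : kv.1 ≠ P[r] := fun h => hp (h ▸ hPr)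
      have : ((P.length : Int) == (r : Int)) = false := by
        rw [beq_eq_false_iff_ne]
        intro hc
        omega
      simp [hp, hne, this]
  · -- key bounds
    intro kv _
    by_cases hp : kv.1 ∈ P
    · have := List.idxOf_lt_length_of_mem hp
      simp only [hp, if_pos]
      omega
    · simp only [hp, ite_false]
      omega

-- ===== VERDICT (by name: the statement is the Claim_ definition above) =====
theorem prioritize_sections_spec : Claim_equal_prioritize_sections := by
  intro grouped intent _ hpre
  unfold Spec_prioritize_sections prioritize_sections prioritize_sections_alt
  exact pv_main grouped _ (pv_PO_nodup intent) hpre
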